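-- pv_equiv track=rewrite | github.com/kuba2k2/kuba2k2 | mdserver/mdserver/util.py | trimtext
-- ===== SOURCE A (Python) =====
-- def trimtext(text: str, length: int, sentence: bool = False) -> str:
--     # trim a string, breaking on word boundary
--     words = text.split(" ")
--     text = ""
--     for word in words:
--         text += word + " "
--         if len(text) >= length or sentence and word[-1:] in ".?!":
--             break
--     # append an ellipsis if needed
--     text = text.strip(" ,:/")
--     if text[-1:] in ".?!":
--         return text
--     return text + "..."
-- ===== SOURCE B (Python) =====
-- def _cut(text, length, sentence):
--     # character-level scan: index of the word boundary where trimming stops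
--     # (len(text) if no boundary triggers); prev = last char of the current word
--     prev = ""
--     for i, c in enumerate(text):
--         if c == " ":
--             if i + 1 >= length or (sentence and prev in ".?!"):
--                 return i
--             prev = ""
--         else:
--             prev = c
--     return len(text)
--
--
-- def trimtext(text: str, length: int, sentence: bool = False) -> str:
--     # no split: scan characters once to find the cut position, then slice
--     p = _cut(text, length, sentence)
--     t = (text[:p] + " ").strip(" ,:/")
--     if t[-1:] in ".?!":
--         return t
--     return t + "..."
-- ===== Notes on version B (the rewrite author's own statement) =====
-- stated objective: alternative
-- what changed: A splits the text into words and builds the trimmed string inside an accumulating word loop that breaks on length/sentence-end; B never splits: a single character-level scan over the original string finds the cut position (checking the stop condition at each space, tracking the last character of the current word), and the result is a slice text[:p] of the original string.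
import Mathlib
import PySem

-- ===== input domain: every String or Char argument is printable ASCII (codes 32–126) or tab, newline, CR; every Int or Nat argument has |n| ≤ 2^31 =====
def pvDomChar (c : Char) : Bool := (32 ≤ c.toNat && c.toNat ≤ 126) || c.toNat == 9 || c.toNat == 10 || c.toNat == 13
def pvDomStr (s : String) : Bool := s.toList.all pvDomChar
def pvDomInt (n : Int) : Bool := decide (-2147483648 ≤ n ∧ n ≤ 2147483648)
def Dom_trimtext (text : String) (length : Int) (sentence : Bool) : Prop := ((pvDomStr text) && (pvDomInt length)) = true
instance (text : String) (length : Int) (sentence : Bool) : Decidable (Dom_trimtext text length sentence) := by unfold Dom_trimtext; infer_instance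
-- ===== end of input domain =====

-- B replaces A's split-into-words + accumulating word loop by a single character-level
-- scan that finds the cut position, then slices the original string (objective: alternative).

-- ===== PORT A =====
-- the accumulating for-loop of A: text += word + " "; break when long enough (or sentence end)
def trimtextLoop (length : Int) (sentence : Bool) : List (List Char) → List Char → List Char
  | [], text => text
  | word :: words, text =>
    let text' := text ++ word ++ [' ']
    if decide (length ≤ PySem.Chars.len text') ||
       (sentence && PySem.Chars.isIn (PySem.List.slice word (some (-1)) none) ".?!".toList) then
      text'
    else trimtextLoop length sentence words text'

def trimtext (text : String) (length : Int) (sentence : Bool) : String :=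
  let words := PySem.Chars.splitOn text.toList [' ']
  let t := trimtextLoop length sentence words []
  let t := PySem.Chars.stripChars t " ,:/".toList
  if PySem.Chars.isIn (PySem.List.slice t (some (-1)) none) ".?!".toList then String.ofList t
  else String.ofList (t ++ "...".toList)

-- ===== PORT B =====
-- Source B's _cut: enumerate the characters; at each space decide whether to stop there,
-- tracking prev = last char of the current word ([] = Python's ""); after the loop the
-- running index i equals len(text), Source B's fallback return value.
def trimtextAltCut (length : Int) (sentence : Bool) : List Char → Nat → List Char → Nat
  | [], i, _ => i
  | c :: cs, i, prev =>
    if c = ' ' then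
      if decide (length ≤ (i : Int) + 1) || (sentence && PySem.Chars.isIn prev ".?!".toList) then i
      else trimtextAltCut length sentence cs (i + 1) []
    else trimtextAltCut length sentence cs (i + 1) [c]

def trimtext_alt (text : String) (length : Int) (sentence : Bool) : String :=
  let cs := text.toList
  let p := trimtextAltCut length sentence cs 0 []
  let t := PySem.Chars.stripChars (PySem.List.slice cs none (some (p : Int)) ++ [' ']) " ,:/".toList
  if PySem.Chars.isIn (PySem.List.slice t (some (-1)) none) ".?!".toList then String.ofList t
  else String.ofList (t ++ "...".toList)

-- ===== PRECONDITION & SPEC =====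
def Spec_trimtext (text : String) (length : Int) (sentence : Bool) (out : String) : Prop := out = trimtext_alt text length sentence
instance (text : String) (length : Int) (sentence : Bool) (out : String) : Decidable (Spec_trimtext text length sentence out) := by unfold Spec_trimtext; infer_instance

-- ===== CLAIM (what is proved, stated in full; the proofs are below) =====
def Claim_equal_trimtext : Prop := ∀ (text : String) (length : Int) (sentence : Bool), Dom_trimtext text length sentence → Spec_trimtext text length sentence (trimtext text length sentence)

-- ===== LEMMAS AND PROOFS =====

-- proof-side structural version of s.split(" ")
def mySplit : List Char → List (List Char)
  | [] => [[]]
  | c :: rest =>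
    if c = ' ' then [] :: mySplit rest
    else
      match mySplit rest with
      | [] => [[c]]
      | w :: ws => (c :: w) :: ws

def consHead (p : List Char) : List (List Char) → List (List Char)
  | [] => [p]
  | w :: ws => (p ++ w) :: ws

theorem mySplit_ne_nil (cs : List Char) : mySplit cs ≠ [] := by
  cases cs with
  | nil => simp [mySplit]
  | cons c rest =>
    simp only [mySplit]
    split_ifs
    · simp
    · cases h : mySplit rest <;> simp

theorem splitOn_go_eq :
    ∀ (fuel : Nat) (l cur : List Char) (accs : List (List Char)), l.length < fuel →
      PySem.Chars.splitOn.go [' '] fuel l cur accs = accs.reverse ++ consHead cur.reverse (mySplit l) := by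
  intro fuel
  induction fuel with
  | zero => intro l cur accs h; omega
  | succ f ih =>
    intro l cur accs h
    cases l with
    | nil => simp [PySem.Chars.splitOn.go, mySplit, consHead]
    | cons c rest =>
      simp only [PySem.Chars.splitOn.go, List.isPrefixOf, mySplit]
      by_cases hc : c = ' '
      · subst hc
        simp only [beq_self_eq_true, Bool.and_true, if_true, List.length_cons,
          List.drop_succ_cons, List.drop_zero, List.length_nil]
        rw [ih rest [] (cur.reverse :: accs) (by simp at h ⊢; omega)]
        simp only [consHead, List.reverse_cons, List.append_assoc, List.nil_append,
          List.cons_append, List.reverse_nil]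
        cases hms : mySplit rest with
        | nil => exact absurd hms (mySplit_ne_nil rest)
        | cons w ws => simp
      · have hbe : (' ' == c) = false := beq_eq_false_iff_ne.mpr (fun hh => hc hh.symm)
        simp only [hbe, Bool.false_and, Bool.false_eq_true, if_false, if_neg hc]
        rw [ih rest (c :: cur) accs (by simp at h ⊢; omega)]
        cases hms : mySplit rest <;> simp [consHead]

theorem splitOn_eq_mySplit (cs : List Char) :
    PySem.Chars.splitOn cs [' '] = mySplit cs := by
  unfold PySem.Chars.splitOn
  rw [splitOn_go_eq (cs.length + 1) cs [] [] (by omega)]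
  simp only [List.reverse_nil, List.nil_append]
  cases hms : mySplit cs with
  | nil => exact absurd hms (mySplit_ne_nil cs)
  | cons w ws => simp [consHead]

def prevAfter (w prev : List Char) : List Char :=
  if w = [] then prev else w.drop (w.length - 1)

theorem altCut_through_word (length : Int) (sentence : Bool) :
    ∀ (w : List Char), (' ' ∉ w) → ∀ (rest : List Char) (i : Nat) (prev : List Char),
      trimtextAltCut length sentence (w ++ rest) i prev =
        trimtextAltCut length sentence rest (i + w.length) (prevAfter w prev) := by
  intro w
  induction w with
  | nil => intro _ rest i prev; simp [prevAfter]
  | cons c w' ih =>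
    intro hw rest i prev
    have hc : c ≠ ' ' := fun h => hw (by simp [h])
    simp only [List.cons_append, trimtextAltCut, if_neg hc]
    rw [ih (fun h => hw (List.mem_cons_of_mem _ h)) rest (i + 1) [c]]
    congr 1
    · simp; omega
    · unfold prevAfter
      cases w' with
      | nil => simp
      | cons d w'' => simp [List.length_cons]

theorem altCut_bounds (length : Int) (sentence : Bool) :
    ∀ (cs : List Char) (i : Nat) (prev : List Char),
      i ≤ trimtextAltCut length sentence cs i prev ∧
      trimtextAltCut length sentence cs i prev ≤ i + cs.length := by
  intro cs
  induction cs with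
  | nil => intro i prev; simp [trimtextAltCut]
  | cons c cs' ih =>
    intro i prev
    simp only [trimtextAltCut, List.length_cons]
    split_ifs with h1 h2
    · omega
    · have := ih (i + 1) []
      omega
    · have := ih (i + 1) [c]
      omega

theorem mySplit_nospace (cs : List Char) (h : ' ' ∉ cs) : mySplit cs = [cs] := by
  induction cs with
  | nil => simp [mySplit]
  | cons c rest ih =>
    have hc : c ≠ ' ' := fun hh => h (by simp [hh])
    simp only [mySplit, if_neg hc, ih (fun hh => h (List.mem_cons_of_mem _ hh))]

theorem mySplit_decomp (w r : List Char) (h : ' ' ∉ w) :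
    mySplit (w ++ ' ' :: r) = w :: mySplit r := by
  induction w with
  | nil => simp [mySplit]
  | cons c w' ih =>
    have hc : c ≠ ' ' := fun hh => h (by simp [hh])
    simp only [List.cons_append, mySplit, if_neg hc,
      ih (fun hh => h (List.mem_cons_of_mem _ hh))]

theorem prevAfter_nil (w : List Char) : prevAfter w [] = w.drop (w.length - 1) := by
  unfold prevAfter
  split_ifs with h
  · subst h; simp
  · rfl

theorem main_lemma (length : Int) (sentence : Bool) :
    ∀ (n : Nat) (cs : List Char), cs.length ≤ n → ∀ (acc : List Char),
      trimtextLoop length sentence (mySplit cs) acc =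
        acc ++ cs.take (trimtextAltCut length sentence cs acc.length [] - acc.length) ++ [' '] := by
  intro n
  induction n with
  | zero =>
    intro cs h acc
    have hnil : cs = [] := List.eq_nil_of_length_eq_zero (by omega)
    subst hnil
    simp only [mySplit, trimtextLoop, trimtextAltCut]
    split_ifs <;> simp
  | succ m ih =>
    intro cs hlen acc
    by_cases hsp : ' ' ∈ cs
    · -- cs = w ++ ' ' :: r, no space in w
      obtain ⟨w, r, hw, hcs⟩ : ∃ w r, ' ' ∉ w ∧ cs = w ++ ' ' :: r := by
        refine ⟨cs.takeWhile (· ≠ ' '), (cs.dropWhile (· ≠ ' ')).tail, ?_, ?_⟩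
        · intro hmem
          have := List.mem_takeWhile_imp hmem
          simp at this
        · have hne : cs.dropWhile (· ≠ ' ') ≠ [] := by
            intro hd
            rw [List.dropWhile_eq_nil_iff] at hd
            have := hd _ hsp
            simp at this
          have hhead : (cs.dropWhile (· ≠ ' ')).head hne = ' ' := by
            have := List.head_dropWhile_not (fun c : Char => decide (c ≠ ' ')) hne
            simpa using this
          conv_lhs => rw [← List.takeWhile_append_dropWhile (p := fun c => decide (c ≠ ' ')) (l := cs)]
          rw [← List.cons_head_tail hne, hhead]
          simp
      subst hcs
      rw [mySplit_decomp w r hw,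
          altCut_through_word length sentence w hw (' ' :: r) acc.length []]
      have hC : (decide (length ≤ PySem.Chars.len (acc ++ w ++ [' '])) ||
          (sentence && PySem.Chars.isIn (PySem.List.slice w (some (-1)) none) ".?!".toList)) =
          (decide (length ≤ ((acc.length + w.length : Nat) : Int) + 1) ||
          (sentence && PySem.Chars.isIn (prevAfter w []) ".?!".toList)) := by
        rw [PySem.List.slice_from_neg_one, ← prevAfter_nil]
        congr 2
        simp [PySem.Chars.len_eq]
        ring_nf
      simp only [trimtextLoop, trimtextAltCut, hC]
      split_ifs with hcond
      · -- break at this word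
        have hww : acc.length + w.length - acc.length = w.length := by omega
        rw [hww]
        simp
      · -- continue into r
        have hr : r.length ≤ m := by
          simp at hlen; omega
        rw [ih r hr (acc ++ w ++ [' '])]
        have hb := (altCut_bounds length sentence r (acc.length + w.length + 1) []).1
        set q := trimtextAltCut length sentence r (acc.length + w.length + 1) [] with hq
        have h1 : (acc ++ w ++ [' ']).length = acc.length + w.length + 1 := by simp; omega
        have h2 : q - acc.length = w.length + (1 + (q - (acc.length + w.length + 1))) := by omega
        rw [h1, h2, List.take_append, List.take_cons,
          List.take_of_length_le (l := w)
            (i := w.length + (1 + (q - (acc.length + w.length + 1)))) (by omega)]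
        simp
        rw [hq]
        omega
    · -- single word, no space anywhere
      rw [mySplit_nospace cs hsp]
      have hcut : trimtextAltCut length sentence cs acc.length [] = acc.length + cs.length := by
        have h := altCut_through_word length sentence cs hsp [] acc.length []
        simpa [trimtextAltCut] using h
      rw [hcut]
      simp only [trimtextLoop]
      split_ifs <;> simp

-- ===== VERDICT (by name: the statement is the Claim_ definition above) =====
theorem trimtext_spec : Claim_equal_trimtext := by
  unfold Claim_equal_trimtext
  intro text length sentence _
  unfold Spec_trimtext trimtext trimtext_alt
  dsimp only
  rw [splitOn_eq_mySplit,
      main_lemma length sentence text.toList.length text.toList le_rfl []]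
  have hb := (altCut_bounds length sentence text.toList 0 []).2
  rw [PySem.List.slice_to_natCast]
  simp
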